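-- pv_equiv track=rewrite | github.com/RideGreg/LeetCode | Python/5366.py | minimumMessages
-- ===== SOURCE A (Python) =====
-- import bisect, collections
-- import collections
--
-- def minimumMessages(m, record):
--     if len(record) <= 2: return -1
--     #bk = list(record)
--     change = collections.defaultdict(int)
--     ans = 0
--     for i in range(2, len(record)):
--         s, lost = 0, 0
--         for j in range(3):
--             s += max(0, record[i-j])
--             lost += int(record[i-j] == -1)
--         if s >= m: continue
--         if lost == 0:
--             return -1
--         for j in range(3):
--             if record[i-j] == -1:
--                 change[i-j] = max(m - s, change[i-j])
--     return sum(max(x, change[i]) for i, x in enumerate(record))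
-- ===== SOURCE B (Python) =====
-- def minimumMessages(m, record):
--     # Streaming one-pass: rolling window deficits in three registers, finalize
--     # each position two steps later, flush the last two positions at the end.
--     n = len(record)
--     if n <= 2:
--         return -1
--     total = 0
--     d1 = 0  # deficit of the window ending at i-1 (0 if that window does not exist)
--     d2 = 0  # deficit of the window ending at i-2
--     for i in range(n):
--         d0 = 0
--         if i >= 2:
--             s = max(0, record[i]) + max(0, record[i - 1]) + max(0, record[i - 2])
--             if s < m:
--                 if record[i] != -1 and record[i - 1] != -1 and record[i - 2] != -1:
--                     return -1
--                 d0 = m - s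
--             # position i-2 is now covered by all windows that contain it
--             x = record[i - 2]
--             total += max(x, max(d2, d1, d0)) if x == -1 else max(x, 0)
--         d2, d1 = d1, d0
--     x = record[n - 2]
--     total += max(x, max(d2, d1)) if x == -1 else max(x, 0)
--     x = record[n - 1]
--     total += max(x, d1) if x == -1 else max(x, 0)
--     return total
-- ===== Notes on version B (the rewrite author's own statement) =====
-- stated objective: alternative
-- what changed: Replaces A's per-window push of max-deficits into a defaultdict followed by a final enumerate-sum with a single streaming pass that keeps the last three window deficits in rolling registers, finalizes each position two steps later, and flushes the last two positions, so no dict and no second pass exist.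
import Mathlib
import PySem

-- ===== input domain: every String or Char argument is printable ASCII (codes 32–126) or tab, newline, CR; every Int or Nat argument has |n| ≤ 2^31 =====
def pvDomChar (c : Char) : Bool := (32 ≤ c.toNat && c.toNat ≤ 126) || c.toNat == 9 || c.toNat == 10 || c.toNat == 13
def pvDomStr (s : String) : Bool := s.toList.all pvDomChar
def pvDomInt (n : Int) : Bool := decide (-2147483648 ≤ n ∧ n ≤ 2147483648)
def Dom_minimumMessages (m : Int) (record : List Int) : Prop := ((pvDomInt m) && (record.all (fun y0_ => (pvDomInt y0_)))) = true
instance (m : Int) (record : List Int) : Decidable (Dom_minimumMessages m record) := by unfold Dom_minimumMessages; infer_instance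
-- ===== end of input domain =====

-- B replaces A's defaultdict of per-window max-updates plus a final enumerate-sum by a
-- single streaming pass with rolling deficit registers and a two-position flush
-- (objective: alternative).

-- ===== PORT A =====
-- inner j-loop of A: s, lost over the window ending at i (indices i-j are in
-- range whenever 2 ≤ i < len record, so pyGetD's default 0 is never used there)
def mmWin (record : List Int) (i : Int) : Int × Int :=
  (PySem.List.pyRange 0 3 1).foldl
    (fun sl j =>
      (sl.1 + max 0 (PySem.List.pyGetD record (i - j) 0),
       sl.2 + (if PySem.List.pyGetD record (i - j) 0 = -1 then 1 else 0)))
    (0, 0)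

-- one iteration of A's outer loop; `none` models the early `return -1`
def mmStepA (m : Int) (record : List Int) (st : Option (PySem.Dict Int Int)) (i : Int) :
    Option (PySem.Dict Int Int) :=
  match st with
  | none => none
  | some change =>
    let sl := mmWin record i
    if m ≤ sl.1 then some change
    else if sl.2 = 0 then none
    else
      some ((PySem.List.pyRange 0 3 1).foldl
        (fun ch j =>
          if PySem.List.pyGetD record (i - j) 0 = -1 then
            ch.insert (i - j) (max (m - sl.1) (ch.getD (i - j) 0))
          else ch) change)

def minimumMessages (m : Int) (record : List Int) : Int :=
  if record.length ≤ 2 then -1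
  else
    match (PySem.List.pyRange 2 (record.length : Int) 1).foldl (mmStepA m record)
        (some PySem.Dict.empty) with
    | none => -1
    | some change =>
      ((PySem.List.enumerate record 0).map (fun p => max p.2 (change.getD p.1 0))).sum

-- ===== PORT B =====
-- Source B's inline window sum max(0,record[i]) + max(0,record[i-1]) + max(0,record[i-2])
def mmWsum (record : List Int) (e : Int) : Int :=
  max 0 (PySem.List.pyGetD record e 0) + max 0 (PySem.List.pyGetD record (e - 1) 0)
    + max 0 (PySem.List.pyGetD record (e - 2) 0)

-- Source B's finalization of position i-2 plus the register shift (d2, d1 = d1, d0)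
def mmFinB (record : List Int) (i total d2 d1 d0 : Int) : Int × Int × Int :=
  let x := PySem.List.pyGetD record (i - 2) 0
  (total + (if x = -1 then max x (max (max d2 d1) d0) else max x 0), d0, d1)

-- one iteration of Source B's streaming loop; state (total, d1, d2), `none` = early return -1
def mmStepB (m : Int) (record : List Int) (st : Option (Int × Int × Int)) (i : Int) :
    Option (Int × Int × Int) :=
  match st with
  | none => none
  | some (total, d1, d2) =>
    if 2 ≤ i then
      let s := mmWsum record i
      if s < m then
        if PySem.List.pyGetD record i 0 ≠ -1 ∧ PySem.List.pyGetD record (i - 1) 0 ≠ -1 ∧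
            PySem.List.pyGetD record (i - 2) 0 ≠ -1 then none
        else some (mmFinB record i total d2 d1 (m - s))
      else some (mmFinB record i total d2 d1 0)
    else some (total, 0, d1)

def minimumMessages_alt (m : Int) (record : List Int) : Int :=
  let n : Int := record.length
  if n ≤ 2 then -1
  else
    match (PySem.List.pyRange 0 n 1).foldl (mmStepB m record) (some (0, 0, 0)) with
    | none => -1
    | some (total, d1, _d2) =>
      let x1 := PySem.List.pyGetD record (n - 2) 0
      let t1 := total + (if x1 = -1 then max x1 (max _d2 d1) else max x1 0)
      let x2 := PySem.List.pyGetD record (n - 1) 0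
      t1 + (if x2 = -1 then max x2 d1 else max x2 0)

-- ===== PRECONDITION & SPEC =====
def Spec_minimumMessages (m : Int) (record : List Int) (out : Int) : Prop := out = minimumMessages_alt m record
instance (m : Int) (record : List Int) (out : Int) : Decidable (Spec_minimumMessages m record out) := by unfold Spec_minimumMessages; infer_instance

-- ===== CLAIM (what is proved, stated in full; the proofs are below) =====
def Claim_equal_minimumMessages : Prop := ∀ (m : Int) (record : List Int), Dom_minimumMessages m record → Spec_minimumMessages m record (minimumMessages m record)

-- ===== LEMMAS AND PROOFS =====

-- the bad-window test (deficient and no -1 slot), as a named predicate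
def mmBad (m : Int) (record : List Int) (e : Int) : Bool :=
  decide (mmWsum record e < m) &&
  (PySem.List.pyRange 0 3 1).all (fun j => PySem.List.pyGetD record (e - j) 0 != -1)

-- the per-key effect of A's window update, as a scalar fold step
def mmUpdK (m : Int) (record : List Int) (k : Int) (acc : Int) (e : Int) : Int :=
  if mmWsum record e < m ∧ e - 2 ≤ k ∧ k ≤ e ∧ PySem.List.pyGetD record k 0 = -1 then
    max (m - mmWsum record e) acc
  else acc

-- deficit of the (existing) window ending at e, 0 if none or not deficient
def mmNd (m : Int) (record : List Int) (e : Int) : Int :=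
  if 2 ≤ e ∧ e < (record.length : Int) ∧ mmWsum record e < m then m - mmWsum record e else 0

-- the contribution of position p to the final sum, in both programs
def mmTerm (m : Int) (record : List Int) (p : Int) : Int :=
  let x := PySem.List.pyGetD record p 0
  max x (if x = -1 then
    max (max (mmNd m record p) (mmNd m record (p + 1))) (mmNd m record (p + 2)) else 0)

theorem pyRange03 : PySem.List.pyRange 0 3 1 = [0, 1, 2] := by decide

theorem mmWin_fst (record : List Int) (i : Int) :
    (mmWin record i).1 = mmWsum record i := by
  simp only [mmWin, mmWsum, pyRange03, List.foldl, sub_zero]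
  omega

theorem mmWin_snd_zero (record : List Int) (i : Int) :
    ((mmWin record i).2 = 0) ↔
      (PySem.List.pyGetD record i 0 ≠ -1 ∧ PySem.List.pyGetD record (i-1) 0 ≠ -1 ∧
       PySem.List.pyGetD record (i-2) 0 ≠ -1) := by
  simp only [mmWin, pyRange03, List.foldl, sub_zero]
  split_ifs <;> simp_all

theorem mmBad_iff (m : Int) (record : List Int) (e : Int) :
    mmBad m record e = true ↔
      (mmWsum record e < m ∧ (mmWin record e).2 = 0) := by
  simp only [mmBad, pyRange03, mmWin_snd_zero, List.all_cons, List.all_nil, sub_zero,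
    Bool.and_eq_true, decide_eq_true_eq, bne_iff_ne, Bool.and_true]
  try tauto

theorem foldl_stepA_none (m : Int) (record : List Int) (l : List Int) :
    l.foldl (mmStepA m record) none = none := by
  induction l with
  | nil => rfl
  | cons e l ih => simpa [mmStepA] using ih

theorem mmStepA_skip (m : Int) (record : List Int) (d : PySem.Dict Int Int) (e : Int)
    (h1 : m ≤ (mmWin record e).1) : mmStepA m record (some d) e = some d := by
  simp [mmStepA, h1]

theorem mmStepA_abort (m : Int) (record : List Int) (d : PySem.Dict Int Int) (e : Int)
    (h1 : ¬ m ≤ (mmWin record e).1) (h2 : (mmWin record e).2 = 0) :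
    mmStepA m record (some d) e = none := by
  simp [mmStepA, h1, h2]

theorem mmStepA_upd (m : Int) (record : List Int) (d : PySem.Dict Int Int) (e : Int)
    (h1 : ¬ m ≤ (mmWin record e).1) (h2 : (mmWin record e).2 ≠ 0) :
    mmStepA m record (some d) e = some ((PySem.List.pyRange 0 3 1).foldl
        (fun ch j =>
          if PySem.List.pyGetD record (e - j) 0 = -1 then
            ch.insert (e - j) (max (m - (mmWin record e).1) (ch.getD (e - j) 0))
          else ch) d) := by
  simp [mmStepA, h1, h2]

theorem foldl_stepA_eq_none_iff (m : Int) (record : List Int) (l : List Int)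
    (d : PySem.Dict Int Int) :
    l.foldl (mmStepA m record) (some d) = none ↔ ∃ e ∈ l, mmBad m record e = true := by
  induction l generalizing d with
  | nil => simp
  | cons e l ih =>
    rw [List.foldl_cons]
    by_cases h1 : m ≤ (mmWin record e).1
    · have hb : mmBad m record e = false := by
        rw [Bool.eq_false_iff]
        intro hc
        rw [mmBad_iff] at hc
        rw [mmWin_fst] at h1
        omega
      rw [mmStepA_skip m record d e h1, ih d]
      constructor
      · rintro ⟨x, hx, hbx⟩
        exact ⟨x, List.mem_cons_of_mem _ hx, hbx⟩
      · rintro ⟨x, hx, hbx⟩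
        rcases List.mem_cons.1 hx with h | h
        · subst h; rw [hb] at hbx; cases hbx
        · exact ⟨x, h, hbx⟩
    · by_cases h2 : (mmWin record e).2 = 0
      · have hb : mmBad m record e = true := by
          rw [mmBad_iff, ← mmWin_fst]
          exact ⟨by omega, h2⟩
        rw [mmStepA_abort m record d e h1 h2, foldl_stepA_none]
        simp only [true_iff]
        exact ⟨e, List.mem_cons_self .., hb⟩
      · rw [mmStepA_upd m record d e h1 h2, ih _]
        constructor
        · rintro ⟨x, hx, hbx⟩
          exact ⟨x, List.mem_cons_of_mem _ hx, hbx⟩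
        · rintro ⟨x, hx, hbx⟩
          rcases List.mem_cons.1 hx with h | h
          · subst h
            rw [mmBad_iff, ← mmWin_fst] at hbx
            exact absurd hbx.2 h2
          · exact ⟨x, h, hbx⟩

theorem condInsert_getD (P : Prop) [inst : Decidable P] (ch : PySem.Dict Int Int) (a k w : Int) :
    (if P then ch.insert a (max w (ch.getD a 0)) else ch).getD k 0 =
      if P ∧ k = a then max w (ch.getD k 0) else ch.getD k 0 := by
  by_cases hP : P
  · rw [if_pos hP]
    by_cases hk : k = a
    · subst hk
      rw [if_pos ⟨hP, rfl⟩]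
      simp [PySem.Dict.getD_insert_self]
    · rw [if_neg (by tauto)]
      simp [PySem.Dict.getD_insert, hk]
  · rw [if_neg hP, if_neg (by tauto)]

set_option maxRecDepth 8192 in
theorem innerA_getD (m : Int) (record : List Int) (i k : Int) (ch : PySem.Dict Int Int) (s : Int) :
    ((PySem.List.pyRange 0 3 1).foldl
        (fun ch j =>
          if PySem.List.pyGetD record (i - j) 0 = -1 then
            ch.insert (i - j) (max (m - s) (ch.getD (i - j) 0))
          else ch) ch).getD k 0 =
      if (i - 2 ≤ k ∧ k ≤ i ∧ PySem.List.pyGetD record k 0 = -1) then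
        max (m - s) (ch.getD k 0)
      else ch.getD k 0 := by
  rw [pyRange03]
  rw [List.foldl_cons, List.foldl_cons, List.foldl_cons, List.foldl_nil]
  simp only [sub_zero]
  repeat rw [condInsert_getD]
  by_cases e0 : k = i
  · rw [e0]
    rw [if_neg (show ¬(PySem.List.pyGetD record (i - 2) 0 = -1 ∧ i = i - 2) by
        rintro ⟨-, h⟩; omega),
      if_neg (show ¬(PySem.List.pyGetD record (i - 1) 0 = -1 ∧ i = i - 1) by
        rintro ⟨-, h⟩; omega)]
    by_cases hP0 : PySem.List.pyGetD record i 0 = -1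
    · rw [if_pos ⟨hP0, rfl⟩, if_pos ⟨by omega, by omega, hP0⟩]
    · rw [if_neg (by rintro ⟨h, -⟩; exact hP0 h), if_neg (by rintro ⟨-, -, h⟩; exact hP0 h)]
  · by_cases e1 : k = i - 1
    · rw [e1]
      rw [if_neg (show ¬(PySem.List.pyGetD record (i - 2) 0 = -1 ∧ i - 1 = i - 2) by
          rintro ⟨-, h⟩; omega),
        if_neg (show ¬(PySem.List.pyGetD record i 0 = -1 ∧ i - 1 = i) by
          rintro ⟨-, h⟩; omega)]
      by_cases hP1 : PySem.List.pyGetD record (i - 1) 0 = -1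
      · rw [if_pos ⟨hP1, rfl⟩, if_pos ⟨by omega, by omega, hP1⟩]
      · rw [if_neg (by rintro ⟨h, -⟩; exact hP1 h), if_neg (by rintro ⟨-, -, h⟩; exact hP1 h)]
    · by_cases e2 : k = i - 2
      · rw [e2]
        rw [if_neg (show ¬(PySem.List.pyGetD record (i - 1) 0 = -1 ∧ i - 2 = i - 1) by
            rintro ⟨-, h⟩; omega),
          if_neg (show ¬(PySem.List.pyGetD record i 0 = -1 ∧ i - 2 = i) by
            rintro ⟨-, h⟩; omega)]
        by_cases hP2 : PySem.List.pyGetD record (i - 2) 0 = -1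
        · rw [if_pos ⟨hP2, rfl⟩, if_pos ⟨by omega, by omega, hP2⟩]
        · rw [if_neg (by rintro ⟨h, -⟩; exact hP2 h), if_neg (by rintro ⟨-, -, h⟩; exact hP2 h)]
      · rw [if_neg (by rintro ⟨-, h⟩; exact e2 h),
          if_neg (by rintro ⟨-, h⟩; exact e1 h),
          if_neg (by rintro ⟨-, h⟩; exact e0 h),
          if_neg (show ¬(i - 2 ≤ k ∧ k ≤ i ∧ PySem.List.pyGetD record k 0 = -1) by
            rintro ⟨h1, h2, -⟩; omega)]

theorem foldl_stepA_some (m : Int) (record : List Int) (l : List Int)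
    (hgood : ∀ e ∈ l, mmBad m record e = false) (d : PySem.Dict Int Int) :
    ∃ d', l.foldl (mmStepA m record) (some d) = some d' ∧
      ∀ k, d'.getD k 0 = l.foldl (mmUpdK m record k) (d.getD k 0) := by
  induction l generalizing d with
  | nil => exact ⟨d, rfl, fun k => rfl⟩
  | cons e l ih =>
    have hge : mmBad m record e = false := hgood e (List.mem_cons_self ..)
    have hgl : ∀ e' ∈ l, mmBad m record e' = false := fun e' he' => hgood e' (List.mem_cons_of_mem _ he')
    simp only [List.foldl_cons]
    by_cases h1 : m ≤ (mmWin record e).1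
    · obtain ⟨d', hfold, hk⟩ := ih hgl d
      refine ⟨d', by simpa [mmStepA, h1] using hfold, fun k => ?_⟩
      rw [hk k]
      congr 1
      simp only [mmUpdK, ← mmWin_fst]
      rw [if_neg]
      omega
    · have h2 : (mmWin record e).2 ≠ 0 := by
        intro hc
        rw [Bool.eq_false_iff] at hge
        exact hge (by rw [mmBad_iff, ← mmWin_fst]; exact ⟨by omega, hc⟩)
      set d2 := (PySem.List.pyRange 0 3 1).foldl
        (fun ch j =>
          if PySem.List.pyGetD record (e - j) 0 = -1 then
            ch.insert (e - j) (max (m - (mmWin record e).1) (ch.getD (e - j) 0))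
          else ch) d with hd2
      obtain ⟨d', hfold, hk⟩ := ih hgl d2
      refine ⟨d', ?_, fun k => ?_⟩
      · rw [show mmStepA m record (some d) e = some d2 by simp [mmStepA, h1, h2, hd2]]
        exact hfold
      · rw [hk k]
        congr 1
        rw [hd2, innerA_getD]
        simp only [mmUpdK, ← mmWin_fst]
        by_cases hc : e - 2 ≤ k ∧ k ≤ e ∧ PySem.List.pyGetD record k 0 = -1
        · rw [if_pos hc, if_pos ⟨by omega, hc.1, hc.2.1, hc.2.2⟩]
        · rw [if_neg hc, if_neg (by tauto)]

theorem foldl_id {α β : Type} (l : List β) (f : α → β → α) (init : α)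
    (h : ∀ acc, ∀ e ∈ l, f acc e = acc) : l.foldl f init = init := by
  induction l generalizing init with
  | nil => rfl
  | cons e l ih =>
    rw [List.foldl_cons, h init e (List.mem_cons_self ..)]
    exact ih init fun acc e' he' => h acc e' (List.mem_cons_of_mem _ he')

theorem updK_zero_of_ne (m : Int) (record : List Int) (k : Int)
    (hne : PySem.List.pyGetD record k 0 ≠ -1) (l : List Int) :
    l.foldl (mmUpdK m record k) 0 = 0 := by
  apply foldl_id
  intro acc e _
  simp only [mmUpdK]
  rw [if_neg]
  tauto

theorem mmNd_nonneg (m : Int) (record : List Int) (e : Int) : 0 ≤ mmNd m record e := by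
  unfold mmNd
  split_ifs with h
  · omega
  · omega

theorem maxfold_zero (m : Int) (record : List Int) (l : List Int) (c : Int)
    (h : ∀ e ∈ l, mmNd m record e = 0) (hc : 0 ≤ c) :
    l.foldl (fun a e => max a (mmNd m record e)) c = c := by
  induction l generalizing c with
  | nil => rfl
  | cons e l ih =>
    rw [List.foldl_cons, h e (List.mem_cons_self ..), max_eq_left hc]
    exact ih c (fun e' he' => h e' (List.mem_cons_of_mem _ he')) hc

theorem updK_eq_maxfold (m : Int) (record : List Int) (k : Int) (l : List Int)
    (hneg : PySem.List.pyGetD record k 0 = -1)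
    (hl : ∀ e ∈ l, 2 ≤ e ∧ e < (record.length : Int) ∧ k ≤ e ∧ e ≤ k + 2)
    (c : Int) (hc : 0 ≤ c) :
    l.foldl (mmUpdK m record k) c = l.foldl (fun a e => max a (mmNd m record e)) c := by
  induction l generalizing c with
  | nil => rfl
  | cons e l ih =>
    have he := hl e (List.mem_cons_self ..)
    have hl' : ∀ e' ∈ l, 2 ≤ e' ∧ e' < (record.length : Int) ∧ k ≤ e' ∧ e' ≤ k + 2 :=
      fun e' he' => hl e' (List.mem_cons_of_mem _ he')
    rw [List.foldl_cons, List.foldl_cons]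
    by_cases hs : mmWsum record e < m
    · have h1 : mmUpdK m record k c e = max (m - mmWsum record e) c := by
        simp only [mmUpdK]
        rw [if_pos ⟨hs, by omega, by omega, hneg⟩]
      have h2 : mmNd m record e = m - mmWsum record e := by
        unfold mmNd
        rw [if_pos ⟨he.1, he.2.1, hs⟩]
      rw [h1, h2, max_comm (m - mmWsum record e) c]
      exact ih hl' _ (by omega)
    · have h1 : mmUpdK m record k c e = c := by
        simp only [mmUpdK]
        rw [if_neg (by tauto)]
      have h2 : mmNd m record e = 0 := by
        unfold mmNd
        rw [if_neg (by tauto)]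
      rw [h1, h2, max_eq_left hc]
      exact ih hl' c hc

theorem chvK (m : Int) (record : List Int) (k : Int)
    (h0 : 0 ≤ k) (hk : k < (record.length : Int)) (h3 : 2 < (record.length : Int)) :
    (PySem.List.pyRange 2 (record.length : Int) 1).foldl (mmUpdK m record k) 0 =
      if PySem.List.pyGetD record k 0 = -1 then
        max (max (mmNd m record k) (mmNd m record (k + 1))) (mmNd m record (k + 2))
      else 0 := by
  by_cases hneg : PySem.List.pyGetD record k 0 = -1
  · rw [if_pos hneg]
    have hs1 : PySem.List.pyRange 2 (record.length : Int) 1 =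
        PySem.List.pyRange 2 (max 2 k) 1 ++ PySem.List.pyRange (max 2 k) (record.length : Int) 1 :=
      PySem.List.pyRange_one_append _ _ _ (by omega) (by omega)
    have hs2 : PySem.List.pyRange (max 2 k) (record.length : Int) 1 =
        PySem.List.pyRange (max 2 k) (min (record.length : Int) (k + 3)) 1 ++
        PySem.List.pyRange (min (record.length : Int) (k + 3)) (record.length : Int) 1 :=
      PySem.List.pyRange_one_append _ _ _ (by omega) (by omega)
    rw [hs1, hs2, List.foldl_append, List.foldl_append]
    rw [foldl_id _ (mmUpdK m record k) 0 (fun acc e he => by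
      rw [PySem.List.mem_pyRange_one] at he
      simp only [mmUpdK]
      rw [if_neg (by rintro ⟨-, -, hke, -⟩; omega)])]
    rw [foldl_id _ (mmUpdK m record k) _ (fun acc e he => by
      rw [PySem.List.mem_pyRange_one] at he
      simp only [mmUpdK]
      rw [if_neg (by rintro ⟨-, hke, -, -⟩; omega)])]
    rw [updK_eq_maxfold m record k _ hneg (fun e he => by
      rw [PySem.List.mem_pyRange_one] at he
      exact ⟨by omega, by omega, by omega, by omega⟩) 0 le_rfl]
    have hA1 : PySem.List.pyRange k (k + 3) 1 =
        PySem.List.pyRange k (max 2 k) 1 ++ PySem.List.pyRange (max 2 k) (k + 3) 1 :=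
      PySem.List.pyRange_one_append _ _ _ (by omega) (by omega)
    have hA2 : PySem.List.pyRange (max 2 k) (k + 3) 1 =
        PySem.List.pyRange (max 2 k) (min (record.length : Int) (k + 3)) 1 ++
        PySem.List.pyRange (min (record.length : Int) (k + 3)) (k + 3) 1 :=
      PySem.List.pyRange_one_append _ _ _ (by omega) (by omega)
    have key : (PySem.List.pyRange k (k + 3) 1).foldl (fun a e => max a (mmNd m record e)) 0 =
        (PySem.List.pyRange (max 2 k) (min (record.length : Int) (k + 3)) 1).foldl
          (fun a e => max a (mmNd m record e)) 0 := by
      rw [hA1, hA2, List.foldl_append, List.foldl_append]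
      rw [maxfold_zero m record _ 0 (fun e he => by
        rw [PySem.List.mem_pyRange_one] at he
        unfold mmNd
        rw [if_neg (by rintro ⟨h2e, -, -⟩; omega)]) le_rfl]
      exact maxfold_zero m record _ _ (fun e he => by
        rw [PySem.List.mem_pyRange_one] at he
        unfold mmNd
        rw [if_neg (by rintro ⟨-, hen, -⟩; omega)])
        (PySem.List.le_foldl_max_int _ (mmNd m record) 0).1
    rw [← key]
    rw [PySem.List.pyRange_one_cons (by omega : k < k + 3),
      PySem.List.pyRange_one_cons (by omega : k + 1 < k + 3),
      PySem.List.pyRange_one_cons (by omega : k + 1 + 1 < k + 3),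
      PySem.List.pyRange_one_eq_nil (by omega : k + 3 ≤ k + 1 + 1 + 1)]
    simp only [List.foldl_cons, List.foldl_nil]
    rw [max_eq_right (mmNd_nonneg m record k)]
    rw [show k + 1 + 1 = k + 2 by ring]
  · rw [if_neg hneg, updK_zero_of_ne m record k hneg]

-- B-side: one step from a live state is none exactly on an (existing) bad window
theorem stepB_none_iff (m : Int) (record : List Int) (st : Int × Int × Int) (e : Int) :
    mmStepB m record (some st) e = none ↔ (2 ≤ e ∧ mmBad m record e = true) := by
  obtain ⟨t, d1, d2⟩ := st
  simp only [mmStepB, mmBad_iff, mmWin_snd_zero]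
  split_ifs with h1 h2 h3 <;> simp_all

theorem foldl_stepB_none (m : Int) (record : List Int) (l : List Int) :
    l.foldl (mmStepB m record) none = none := by
  induction l with
  | nil => rfl
  | cons e l ih => simpa [mmStepB] using ih

theorem foldl_stepB_eq_none_iff (m : Int) (record : List Int) (l : List Int)
    (st : Int × Int × Int) :
    l.foldl (mmStepB m record) (some st) = none ↔
      ∃ e ∈ l, 2 ≤ e ∧ mmBad m record e = true := by
  induction l generalizing st with
  | nil => simp
  | cons e l ih =>
    rw [List.foldl_cons]
    rcases hstep : mmStepB m record (some st) e with _ | st'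
    · rw [foldl_stepB_none]
      simp only [true_iff]
      exact ⟨e, List.mem_cons_self .., (stepB_none_iff m record st e).1 hstep⟩
    · rw [ih st']
      constructor
      · rintro ⟨x, hx, hbx⟩
        exact ⟨x, List.mem_cons_of_mem _ hx, hbx⟩
      · rintro ⟨x, hx, hbx⟩
        rcases List.mem_cons.1 hx with h | h
        · subst h
          have := (stepB_none_iff m record st x).2 hbx
          rw [hstep] at this
          cases this
        · exact ⟨x, h, hbx⟩

-- partial sums of the finalized contributions
def mmS (m : Int) (record : List Int) (t : Int) : Int :=
  ((PySem.List.pyRange 0 (t - 2) 1).map (mmTerm m record)).sum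

theorem stepB_invariant (m : Int) (record : List Int) (t : Nat)
    (hn : (t : Int) ≤ (record.length : Int))
    (hgood : ∀ e ∈ PySem.List.pyRange 2 (t : Int) 1, mmBad m record e = false) :
    (PySem.List.pyRange 0 (t : Int) 1).foldl (mmStepB m record) (some (0, 0, 0)) =
      some (mmS m record t, mmNd m record ((t : Int) - 1), mmNd m record ((t : Int) - 2)) := by
  induction t with
  | zero =>
    simp only [Nat.cast_zero] at *
    rw [PySem.List.pyRange_one_eq_nil (by omega)]
    rw [show mmS m record 0 = 0 by
      unfold mmS; rw [PySem.List.pyRange_one_eq_nil (by omega)]; rfl]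
    rw [show mmNd m record ((0 : Int) - 1) = 0 by unfold mmNd; rw [if_neg (by omega)]]
    rw [show mmNd m record ((0 : Int) - 2) = 0 by unfold mmNd; rw [if_neg (by omega)]]
    rfl
  | succ t ih =>
    have hcast : ((t + 1 : Nat) : Int) = (t : Int) + 1 := by push_cast; ring
    rw [hcast] at hn hgood ⊢
    have hgt : ∀ e ∈ PySem.List.pyRange 2 (t : Int) 1, mmBad m record e = false := by
      intro e he
      rw [PySem.List.mem_pyRange_one] at he
      exact hgood e (by rw [PySem.List.mem_pyRange_one]; omega)
    rw [PySem.List.pyRange_one_succ_right (by omega), List.foldl_append,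
      ih (by omega) hgt]
    simp only [List.foldl_cons, List.foldl_nil]
    have hS : mmS m record ((t : Int) + 1) =
        mmS m record t + (if 2 ≤ (t : Int) then mmTerm m record ((t : Int) - 2) else 0) := by
      unfold mmS
      by_cases h2 : 2 ≤ (t : Int)
      · rw [if_pos h2]
        have h := PySem.List.pyRange_one_succ_right (a := 0) (b := (t : Int) - 2) (by omega)
        rw [show (t : Int) + 1 - 2 = (t : Int) - 2 + 1 by ring, h, List.map_append,
          List.sum_append, List.map_cons, List.map_nil, List.sum_cons, List.sum_nil, add_zero]
      · rw [if_neg h2, PySem.List.pyRange_one_eq_nil (by omega),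
          PySem.List.pyRange_one_eq_nil (by omega), add_zero]
    by_cases h2 : 2 ≤ (t : Int)
    · have hbadf : mmBad m record (t : Int) = false :=
        hgood _ (by rw [PySem.List.mem_pyRange_one]; omega)
      by_cases hs : mmWsum record (t : Int) < m
      · have hcond : ¬ (PySem.List.pyGetD record (t : Int) 0 ≠ -1 ∧
            PySem.List.pyGetD record ((t : Int) - 1) 0 ≠ -1 ∧
            PySem.List.pyGetD record ((t : Int) - 2) 0 ≠ -1) := by
          intro hc
          rw [Bool.eq_false_iff] at hbadf
          exact hbadf (by rw [mmBad_iff, mmWin_snd_zero]; exact ⟨hs, hc⟩)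
        simp only [mmStepB, mmFinB, if_pos h2, if_pos hs, if_neg hcond]
        have hd0 : m - mmWsum record (t : Int) = mmNd m record (t : Int) := by
          unfold mmNd; rw [if_pos ⟨h2, by omega, hs⟩]
        rw [hS, if_pos h2, hd0]
        rw [show (t : Int) + 1 - 1 = (t : Int) by ring,
          show (t : Int) + 1 - 2 = (t : Int) - 1 by ring]
        simp only [mmTerm]
        rw [show (t : Int) - 2 + 1 = (t : Int) - 1 by ring,
          show (t : Int) - 2 + 2 = (t : Int) by ring]
        by_cases hx : PySem.List.pyGetD record ((t : Int) - 2) 0 = -1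
        · simp only [if_pos hx]
        · simp only [if_neg hx]
      · simp only [mmStepB, mmFinB, if_pos h2, if_neg hs]
        have hd0 : mmNd m record (t : Int) = 0 := by
          unfold mmNd; rw [if_neg (by tauto)]
        rw [hS, if_pos h2]
        rw [show (t : Int) + 1 - 1 = (t : Int) by ring,
          show (t : Int) + 1 - 2 = (t : Int) - 1 by ring, hd0]
        simp only [mmTerm]
        rw [show (t : Int) - 2 + 1 = (t : Int) - 1 by ring,
          show (t : Int) - 2 + 2 = (t : Int) by ring, hd0]
        by_cases hx : PySem.List.pyGetD record ((t : Int) - 2) 0 = -1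
        · simp only [if_pos hx]
        · simp only [if_neg hx]
    · simp only [mmStepB, if_neg h2]
      rw [hS, if_neg h2, add_zero]
      rw [show (t : Int) + 1 - 1 = (t : Int) by ring,
        show (t : Int) + 1 - 2 = (t : Int) - 1 by ring]
      rw [show mmNd m record (t : Int) = 0 by unfold mmNd; rw [if_neg (by tauto)]]

theorem flush_eq (m : Int) (record : List Int) (h3 : 2 < (record.length : Int)) :
    mmS m record (record.length : Int)
      + (if PySem.List.pyGetD record ((record.length : Int) - 2) 0 = -1 then
          max (PySem.List.pyGetD record ((record.length : Int) - 2) 0)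
            (max (mmNd m record ((record.length : Int) - 2))
              (mmNd m record ((record.length : Int) - 1)))
        else max (PySem.List.pyGetD record ((record.length : Int) - 2) 0) 0)
      + (if PySem.List.pyGetD record ((record.length : Int) - 1) 0 = -1 then
          max (PySem.List.pyGetD record ((record.length : Int) - 1) 0)
            (mmNd m record ((record.length : Int) - 1))
        else max (PySem.List.pyGetD record ((record.length : Int) - 1) 0) 0)
    = ((PySem.List.pyRange 0 (record.length : Int) 1).map (mmTerm m record)).sum := by
  have h1 := PySem.List.pyRange_one_succ_right (a := 0) (b := (record.length : Int) - 1)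
    (by omega)
  rw [show (record.length : Int) - 1 + 1 = (record.length : Int) by ring] at h1
  have h2 := PySem.List.pyRange_one_succ_right (a := 0) (b := (record.length : Int) - 2)
    (by omega)
  rw [show (record.length : Int) - 2 + 1 = (record.length : Int) - 1 by ring] at h2
  rw [h1, h2]
  simp only [List.map_append, List.sum_append, List.map_cons, List.map_nil, List.sum_cons,
    List.sum_nil, add_zero]
  have hz : ∀ e : Int, (record.length : Int) ≤ e → mmNd m record e = 0 := by
    intro e he
    unfold mmNd
    rw [if_neg (by rintro ⟨-, hen, -⟩; omega)]
  have ht2 : mmTerm m record ((record.length : Int) - 2) =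
      (if PySem.List.pyGetD record ((record.length : Int) - 2) 0 = -1 then
        max (PySem.List.pyGetD record ((record.length : Int) - 2) 0)
          (max (mmNd m record ((record.length : Int) - 2))
            (mmNd m record ((record.length : Int) - 1)))
      else max (PySem.List.pyGetD record ((record.length : Int) - 2) 0) 0) := by
    simp only [mmTerm]
    rw [show (record.length : Int) - 2 + 1 = (record.length : Int) - 1 by ring,
      show (record.length : Int) - 2 + 2 = (record.length : Int) by ring,
      hz ((record.length : Int)) le_rfl]
    have n2 := mmNd_nonneg m record ((record.length : Int) - 2)
    have n1 := mmNd_nonneg m record ((record.length : Int) - 1)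
    by_cases hx : PySem.List.pyGetD record ((record.length : Int) - 2) 0 = -1
    · simp only [if_pos hx]
      omega
    · simp only [if_neg hx]
  have ht1 : mmTerm m record ((record.length : Int) - 1) =
      (if PySem.List.pyGetD record ((record.length : Int) - 1) 0 = -1 then
        max (PySem.List.pyGetD record ((record.length : Int) - 1) 0)
          (mmNd m record ((record.length : Int) - 1))
      else max (PySem.List.pyGetD record ((record.length : Int) - 1) 0) 0) := by
    simp only [mmTerm]
    rw [show (record.length : Int) - 1 + 1 = (record.length : Int) by ring,
      show (record.length : Int) - 1 + 2 = (record.length : Int) + 1 by ring,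
      hz ((record.length : Int)) le_rfl, hz ((record.length : Int) + 1) (by omega)]
    have n1 := mmNd_nonneg m record ((record.length : Int) - 1)
    by_cases hx : PySem.List.pyGetD record ((record.length : Int) - 1) 0 = -1
    · simp only [if_pos hx]
      omega
    · simp only [if_neg hx]
  rw [ht2, ht1]
  unfold mmS
  ring

-- ===== VERDICT (by name: the statement is the Claim_ definition above) =====
theorem minimumMessages_spec : Claim_equal_minimumMessages := by
  unfold Claim_equal_minimumMessages
  intro m record _
  unfold Spec_minimumMessages minimumMessages minimumMessages_alt
  by_cases hlen : record.length ≤ 2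
  · rw [if_pos hlen, if_pos (by exact_mod_cast hlen)]
  · rw [if_neg hlen, if_neg (show ¬ ((record.length : Int) ≤ 2) by exact_mod_cast hlen)]
    have h3 : 2 < (record.length : Int) := by exact_mod_cast Nat.lt_of_not_le hlen
    by_cases habort :
        ∃ e ∈ PySem.List.pyRange 2 (record.length : Int) 1, mmBad m record e = true
    · rw [(foldl_stepA_eq_none_iff m record _ _).2 habort]
      obtain ⟨e, he, hbe⟩ := habort
      rw [PySem.List.mem_pyRange_one] at he
      rw [(foldl_stepB_eq_none_iff m record _ _).2
        ⟨e, by rw [PySem.List.mem_pyRange_one]; omega, he.1, hbe⟩]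
    · rw [not_exists] at habort
      simp only [not_and] at habort
      have hgood : ∀ e ∈ PySem.List.pyRange 2 (record.length : Int) 1,
          mmBad m record e = false := by
        intro e he
        have := habort e he
        simpa using this
      obtain ⟨d', hfoldA, hkey⟩ := foldl_stepA_some m record _ hgood PySem.Dict.empty
      rw [hfoldA]
      have hinv := stepB_invariant m record record.length le_rfl hgood
      rw [hinv]
      have hterm : ∀ p ∈ PySem.List.enumerate record 0,
          max p.2 (d'.getD p.1 0) = mmTerm m record p.1 := by
        intro p hp
        rw [PySem.List.mem_enumerate_iff] at hp
        obtain ⟨j, hj, hpj⟩ := hp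
        subst hpj
        simp only [zero_add]
        have hget : PySem.List.pyGetD record (j : Int) 0 = record[j] := by
          rw [PySem.List.pyGetD_natCast]
          exact List.getD_eq_getElem _ _ hj
        rw [hkey, PySem.Dict.getD_empty,
          chvK m record j (Int.natCast_nonneg j) (by exact_mod_cast hj) h3]
        simp only [mmTerm, hget]
      have hsumA : ((PySem.List.enumerate record 0).map
            (fun p => max p.2 (d'.getD p.1 0))).sum =
          ((PySem.List.enumerate record 0).map (fun p => mmTerm m record p.1)).sum := by
        rw [List.map_congr_left hterm]
      have hsumA2 : ((PySem.List.enumerate record 0).map (fun p => mmTerm m record p.1)).sum =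
          ((PySem.List.pyRange 0 (record.length : Int) 1).map (mmTerm m record)).sum := by
        rw [PySem.List.enumerate_eq_map_pyRange (d := 0), List.map_map]
        rfl
      show ((PySem.List.enumerate record 0).map (fun p => max p.2 (d'.getD p.1 0))).sum = _
      rw [hsumA, hsumA2, ← flush_eq m record h3]
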